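-- pv_equiv track=rewrite | github.com/ariuk44/retake_exam_prep | day_19.py | isOddValent
-- ===== SOURCE A (Python) =====
-- def isOddValent(arr):
--     if len(arr) < 2:
--         return 0
--     has_duplicate = 0
--     has_odd = 0
--     for i in range(len(arr)):
--         if arr[i] % 2 != 0:
--             has_odd = 1
--         for j in range(i + 1, len(arr)):
--             if arr[i] == arr[j]:
--                 has_duplicate = 1
--     return 1 if has_odd == 1 and has_duplicate == 1 else 0
-- ===== SOURCE B (Python) =====
-- def isOddValent(arr):
--     if len(arr) < 2:
--         return 0
--     s = sorted(arr)
--     has_odd = any(x % 2 != 0 for x in arr)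
--     has_dup = any(s[k] == s[k + 1] for k in range(len(s) - 1))
--     return 1 if has_odd and has_dup else 0
-- ===== Notes on version B (the rewrite author's own statement) =====
-- stated objective: faster
-- what changed: Replaces the O(n^2) nested pairwise duplicate scan with sort-then-adjacent-pass, and the odd flag with a single any() scan.
import Mathlib
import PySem

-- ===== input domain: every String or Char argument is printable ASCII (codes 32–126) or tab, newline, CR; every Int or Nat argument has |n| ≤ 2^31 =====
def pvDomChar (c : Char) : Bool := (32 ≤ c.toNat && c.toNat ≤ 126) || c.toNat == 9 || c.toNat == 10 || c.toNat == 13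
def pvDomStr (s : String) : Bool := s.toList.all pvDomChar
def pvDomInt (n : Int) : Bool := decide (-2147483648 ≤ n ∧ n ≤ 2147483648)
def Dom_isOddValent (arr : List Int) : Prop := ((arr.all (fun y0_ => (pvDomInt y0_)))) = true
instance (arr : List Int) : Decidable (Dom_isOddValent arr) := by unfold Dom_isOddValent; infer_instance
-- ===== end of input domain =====

-- B replaces A's O(n^2) nested pairwise duplicate scan with sort + one adjacent pass (plus a single odd scan).

-- ===== PORT A =====
-- indices produced by range(len(arr)) / range(i+1, len(arr)) are always in range, so pyGetD's default 0 is unreachable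
def isOddValent (arr : List Int) : Int :=
  if arr.length < 2 then 0
  else
    let st := (PySem.List.pyRange 0 (arr.length : Int) 1).foldl
      (fun (s : Int × Int) i =>
        let ho := if PySem.Int.mod (PySem.List.pyGetD arr i 0) 2 ≠ 0 then 1 else s.2
        let hd := (PySem.List.pyRange (i + 1) (arr.length : Int) 1).foldl
          (fun hd j => if PySem.List.pyGetD arr i 0 = PySem.List.pyGetD arr j 0 then 1 else hd) s.1
        (hd, ho))
      (0, 0)
    if st.2 = 1 ∧ st.1 = 1 then 1 else 0

-- ===== PORT B =====
def isOddValent_alt (arr : List Int) : Int :=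
  if arr.length < 2 then 0
  else
    let s := PySem.List.sorted arr (fun x => x) false
    let hasOdd := arr.any (fun x => decide (PySem.Int.mod x 2 ≠ 0))
    let hasDup := (PySem.List.pyRange 0 ((s.length : Int) - 1) 1).any
        (fun k => decide (PySem.List.pyGetD s k 0 = PySem.List.pyGetD s (k + 1) 0))
    if hasOdd && hasDup then 1 else 0

-- ===== PRECONDITION & SPEC =====
def Spec_isOddValent (arr : List Int) (out : Int) : Prop := out = isOddValent_alt arr
instance (arr : List Int) (out : Int) : Decidable (Spec_isOddValent arr out) := by unfold Spec_isOddValent; infer_instance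

-- ===== CLAIM (what is proved, stated in full; the proofs are below) =====
def Claim_equal_isOddValent : Prop := ∀ (arr : List Int), Dom_isOddValent arr → Spec_isOddValent arr (isOddValent arr)

-- ===== LEMMAS AND PROOFS =====

-- a 0/1 flag that is set once a condition fires and never reset
theorem flagFold (F : Int → Int → Int) (c : Int → Bool)
    (hF : ∀ h i, F h i = if c i then 1 else h) :
    ∀ (l : List Int) (h0 : Int), l.foldl F h0 = if l.any c then 1 else h0 := by
  intro l
  induction l with
  | nil => simp
  | cons a t ih =>
    intro h0
    rw [List.foldl_cons, hF, List.any_cons]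
    by_cases hc : c a = true
    · simp [hc, ih]
    · simp [hc, ih]

-- merging a head test into a once-set flag
theorem ifFlag1 (P Q : Prop) [Decidable P] [Decidable Q] (a : Int) :
    (if Q then (1 : Int) else if P then 1 else a) = if P ∨ Q then 1 else a := by
  by_cases hP : P <;> by_cases hQ : Q <;> simp [hP, hQ]

-- A's outer loop: the two flags evolve independently, each as a once-set flag
theorem outerFold (arr : List Int) :
    ∀ (l : List Int) (a b : Int),
      l.foldl
        (fun (s : Int × Int) i =>
          let ho := if PySem.Int.mod (PySem.List.pyGetD arr i 0) 2 ≠ 0 then 1 else s.2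
          let hd := (PySem.List.pyRange (i + 1) (arr.length : Int) 1).foldl
            (fun hd j => if PySem.List.pyGetD arr i 0 = PySem.List.pyGetD arr j 0 then 1 else hd) s.1
          (hd, ho)) (a, b)
      = (if l.any (fun i => (PySem.List.pyRange (i + 1) (arr.length : Int) 1).any
            (fun j => decide (PySem.List.pyGetD arr i 0 = PySem.List.pyGetD arr j 0))) then 1 else a,
         if l.any (fun i => decide (PySem.Int.mod (PySem.List.pyGetD arr i 0) 2 ≠ 0)) then 1 else b) := by
  intro l
  induction l with
  | nil => simp
  | cons x t ih =>
    intro a b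
    rw [List.foldl_cons]
    show (t.foldl _
      ((PySem.List.pyRange (x + 1) (arr.length : Int) 1).foldl
          (fun hd j => if PySem.List.pyGetD arr x 0 = PySem.List.pyGetD arr j 0 then 1 else hd) a,
        if PySem.Int.mod (PySem.List.pyGetD arr x 0) 2 ≠ 0 then 1 else b)) = _
    rw [flagFold _ (fun j => decide (PySem.List.pyGetD arr x 0 = PySem.List.pyGetD arr j 0))
        (by intro h i; simp), ih]
    simp only [List.any_cons, Bool.or_eq_true, decide_eq_true_eq, ifFlag1]

-- the odd scan over indices equals the odd scan over elements
theorem oddScan (arr : List Int) :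
    (PySem.List.pyRange 0 (arr.length : Int) 1).any
        (fun i => decide (PySem.Int.mod (PySem.List.pyGetD arr i 0) 2 ≠ 0))
      = arr.any (fun x => decide (PySem.Int.mod x 2 ≠ 0)) := by
  conv_rhs => rw [← PySem.List.map_pyGetD_pyRange_zero' arr 0]
  rw [List.any_map]
  rfl

-- A's nested pairwise scan finds a duplicate iff arr is not Nodup
theorem dupScanA (arr : List Int) :
    ((PySem.List.pyRange 0 (arr.length : Int) 1).any
      (fun i => (PySem.List.pyRange (i + 1) (arr.length : Int) 1).any
        (fun j => decide (PySem.List.pyGetD arr i 0 = PySem.List.pyGetD arr j 0))) = true)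
    ↔ ¬ arr.Nodup := by
  simp only [List.any_eq_true, PySem.List.mem_pyRange_one, decide_eq_true_eq]
  constructor
  · rintro ⟨i, ⟨hi0, hin⟩, j, ⟨hj1, hjn⟩, heq⟩
    have hj0 : (0 : Int) ≤ j := by omega
    rw [PySem.List.pyGetD_eq_getElem arr 0 hi0 hin,
        PySem.List.pyGetD_eq_getElem arr 0 hj0 hjn] at heq
    intro hnd
    exact (List.pairwise_iff_getElem.mp hnd i.toNat j.toNat (by omega) (by omega) (by omega)) heq
  · intro hnd
    rw [List.Nodup, List.pairwise_iff_getElem] at hnd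
    push Not at hnd
    obtain ⟨i, j, hi, hj, hij, heq⟩ := hnd
    refine ⟨(i : Int), ⟨by positivity, by exact_mod_cast hi⟩,
            (j : Int), ⟨by exact_mod_cast hij, by exact_mod_cast hj⟩, ?_⟩
    rw [PySem.List.pyGetD_eq_getElem arr 0 (by positivity) (by exact_mod_cast hi),
        PySem.List.pyGetD_eq_getElem arr 0 (by positivity) (by exact_mod_cast hj)]
    simpa using heq
  -- note: (i+1 ≤ j as Int) comes from i < j in ℕ

-- B's adjacent scan on the sorted list finds a duplicate iff the sorted list is not Nodup
theorem dupScanB (s : List Int) (hs : List.Pairwise (fun a b : Int => a ≤ b) s) :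
    ((PySem.List.pyRange 0 ((s.length : Int) - 1) 1).any
      (fun k => decide (PySem.List.pyGetD s k 0 = PySem.List.pyGetD s (k + 1) 0)) = true)
    ↔ ¬ s.Nodup := by
  simp only [List.any_eq_true, PySem.List.mem_pyRange_one, decide_eq_true_eq]
  constructor
  · rintro ⟨k, ⟨hk0, hkn⟩, heq⟩
    rw [PySem.List.pyGetD_eq_getElem s 0 hk0 (by omega),
        PySem.List.pyGetD_eq_getElem s 0 (by omega) (by omega)] at heq
    have hidx : (k + 1).toNat = k.toNat + 1 := by omega
    simp only [hidx] at heq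
    intro hnd
    exact (List.pairwise_iff_getElem.mp hnd k.toNat (k.toNat + 1) (by omega) (by omega)
      (by omega)) heq
  · intro hnd
    rw [List.Nodup, List.pairwise_iff_getElem] at hnd
    push Not at hnd
    obtain ⟨i, j, hi, hj, hij, heq⟩ := hnd
    have hle := List.pairwise_iff_getElem.mp hs
    have h1 : s[i] ≤ s[i + 1]'(by omega) := hle i (i + 1) hi (by omega) (by omega)
    have h2 : s[i + 1]'(by omega) ≤ s[j] := by
      rcases Nat.eq_or_lt_of_le hij with h | h
      · subst h; exact le_refl _
      · exact hle (i + 1) j (by omega) hj h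
    have hadj : s[i] = s[i + 1]'(by omega) := le_antisymm h1 (heq ▸ h2)
    refine ⟨(i : Int), ⟨by positivity, by omega⟩, ?_⟩
    rw [PySem.List.pyGetD_eq_getElem s 0 (by positivity) (by exact_mod_cast hi),
        PySem.List.pyGetD_eq_getElem s 0 (by omega) (by omega)]
    have hidx : ((i : Int) + 1).toNat = i + 1 := by omega
    simp only [hidx, Int.toNat_natCast]
    exact hadj

theorem isOddValent_spec : Claim_equal_isOddValent := by
  intro arr _
  unfold Spec_isOddValent isOddValent isOddValent_alt
  by_cases h2 : arr.length < 2
  · simp [h2]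
  · simp only [h2, if_false]
    rw [outerFold, oddScan]
    have hnd : (PySem.List.sorted arr (fun x : Int => x) false).Nodup ↔ arr.Nodup :=
      (PySem.List.sorted_perm arr (fun x : Int => x) false).nodup_iff
    have hB := dupScanB (PySem.List.sorted arr (fun x : Int => x) false)
      (PySem.List.sorted_pairwise arr (fun x : Int => x))
    have hA := dupScanA arr
    cases hoB : arr.any (fun x => decide (PySem.Int.mod x 2 ≠ 0)) with
    | false => norm_num
    | true =>
      by_cases hd : arr.Nodup
      · have ha := Bool.eq_false_iff.mpr (fun h => (hA.mp h) hd)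
        have hb := Bool.eq_false_iff.mpr (fun h => (hB.mp h) (hnd.mpr hd))
        rw [ha, hb]
        norm_num
      · have ha := hA.mpr hd
        have hb := hB.mpr (fun h => hd (hnd.mp h))
        rw [ha, hb]
        norm_num

-- ===== VERDICT =====
-- (the statement is the Claim_ definition above; isOddValent_spec is proved directly over it)
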